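-- pv_equiv track=rewrite | github.com/pricezhang42/chronodivide-smartbot | packages/chronodivide-bot-sl/transform_lib/feature_layout.py | build_enemy_memory_tech_flags
-- ===== SOURCE A (Python) =====
-- CONSTRUCTION_YARD_NAMES = {"NACNST", "GACNST", "CACNST", "YACNST"}
--
-- POWER_BUILDING_NAMES = {"GAPOWR", "NAPOWR", "NANRCT", "YAPOWR"}
--
-- BARRACKS_NAMES = {"GAPILE", "NAHAND", "YABRCK"}
--
-- REFINERY_NAMES = {"GAREFN", "NAREFN", "YAREFN"}
--
-- FACTORY_NAMES = {"GAWEAP", "NAWEAP", "YAWEAP"}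
--
-- AIRFIELD_NAMES = {"GAAIRC"}
--
-- NAVAL_YARD_NAMES = {"GAYARD", "NAYARD"}
--
-- RADAR_NAMES = {"AMRADR", "NARADR"}
--
-- SERVICE_DEPOT_NAMES = {"GADEPT", "NADEPT"}
--
-- TECH_CENTER_NAMES = {"GATECH", "NATECH"}
--
-- ORE_PURIFIER_NAMES = {"GAOREP"}
--
-- GAP_GENERATOR_NAMES = {"GAGAP"}
--
-- CLONING_VAT_NAMES = {"NACLON"}
--
-- PSYCHIC_SENSOR_NAMES = {"NAPSIS", "YAPSIS"}
--
-- NUCLEAR_SILO_NAMES = {"NAMISL"}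
--
-- IRON_CURTAIN_NAMES = {"NAIRON"}
--
-- WEATHER_CONTROL_NAMES = {"GAWEAT"}
--
-- CHRONOSPHERE_NAMES = {"GACSPH"}
--
-- ENEMY_MEMORY_TECH_FLAG_NAMES = [
--     "seen_enemy_has_construction_yard",
--     "seen_enemy_has_power",
--     "seen_enemy_has_barracks",
--     "seen_enemy_has_refinery",
--     "seen_enemy_has_factory",
--     "seen_enemy_has_airfield",
--     "seen_enemy_has_naval_yard",
--     "seen_enemy_has_radar",
--     "seen_enemy_has_service_depot",
--     "seen_enemy_has_tech_center",
--     "seen_enemy_has_ore_purifier",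
--     "seen_enemy_has_gap_generator",
--     "seen_enemy_has_cloning_vat",
--     "seen_enemy_has_psychic_sensor",
--     "seen_enemy_has_nuclear_silo",
--     "seen_enemy_has_iron_curtain",
--     "seen_enemy_has_weather_control",
--     "seen_enemy_has_chronosphere",
--     "seen_enemy_unlocks_infantry_production",
--     "seen_enemy_unlocks_vehicle_production",
--     "seen_enemy_unlocks_air_production",
--     "seen_enemy_unlocks_naval_production",
--     "seen_enemy_unlocks_tier2",
--     "seen_enemy_unlocks_tier3",
-- ]
--
-- def build_enemy_memory_tech_flags(seen_enemy_building_names: set[str]) -> list[int]: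
--     flags = {
--         "seen_enemy_has_construction_yard": bool(seen_enemy_building_names & CONSTRUCTION_YARD_NAMES),
--         "seen_enemy_has_power": bool(seen_enemy_building_names & POWER_BUILDING_NAMES),
--         "seen_enemy_has_barracks": bool(seen_enemy_building_names & BARRACKS_NAMES),
--         "seen_enemy_has_refinery": bool(seen_enemy_building_names & REFINERY_NAMES),
--         "seen_enemy_has_factory": bool(seen_enemy_building_names & FACTORY_NAMES),
--         "seen_enemy_has_airfield": bool(seen_enemy_building_names & AIRFIELD_NAMES),
--         "seen_enemy_has_naval_yard": bool(seen_enemy_building_names & NAVAL_YARD_NAMES),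
--         "seen_enemy_has_radar": bool(seen_enemy_building_names & RADAR_NAMES),
--         "seen_enemy_has_service_depot": bool(seen_enemy_building_names & SERVICE_DEPOT_NAMES),
--         "seen_enemy_has_tech_center": bool(seen_enemy_building_names & TECH_CENTER_NAMES),
--         "seen_enemy_has_ore_purifier": bool(seen_enemy_building_names & ORE_PURIFIER_NAMES),
--         "seen_enemy_has_gap_generator": bool(seen_enemy_building_names & GAP_GENERATOR_NAMES),
--         "seen_enemy_has_cloning_vat": bool(seen_enemy_building_names & CLONING_VAT_NAMES),
--         "seen_enemy_has_psychic_sensor": bool(seen_enemy_building_names & PSYCHIC_SENSOR_NAMES),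
--         "seen_enemy_has_nuclear_silo": bool(seen_enemy_building_names & NUCLEAR_SILO_NAMES),
--         "seen_enemy_has_iron_curtain": bool(seen_enemy_building_names & IRON_CURTAIN_NAMES),
--         "seen_enemy_has_weather_control": bool(seen_enemy_building_names & WEATHER_CONTROL_NAMES),
--         "seen_enemy_has_chronosphere": bool(seen_enemy_building_names & CHRONOSPHERE_NAMES),
--     }
--     flags.update(
--         {
--             "seen_enemy_unlocks_infantry_production": flags["seen_enemy_has_barracks"],
--             "seen_enemy_unlocks_vehicle_production": flags["seen_enemy_has_factory"],
--             "seen_enemy_unlocks_air_production": flags["seen_enemy_has_airfield"],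
--             "seen_enemy_unlocks_naval_production": flags["seen_enemy_has_naval_yard"],
--             "seen_enemy_unlocks_tier2": flags["seen_enemy_has_radar"]
--             or flags["seen_enemy_has_service_depot"]
--             or flags["seen_enemy_has_tech_center"],
--             "seen_enemy_unlocks_tier3": flags["seen_enemy_has_tech_center"],
--         }
--     )
--     return [int(flags[name]) for name in ENEMY_MEMORY_TECH_FLAG_NAMES]
-- ===== SOURCE B (Python) =====
-- # Single flat name->flag table and one pass over the seen set, instead of 18 set intersections.
-- _CATEGORIES = [
--     (("NACNST", "GACNST", "CACNST", "YACNST"), "seen_enemy_has_construction_yard"),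
--     (("GAPOWR", "NAPOWR", "NANRCT", "YAPOWR"), "seen_enemy_has_power"),
--     (("GAPILE", "NAHAND", "YABRCK"), "seen_enemy_has_barracks"),
--     (("GAREFN", "NAREFN", "YAREFN"), "seen_enemy_has_refinery"),
--     (("GAWEAP", "NAWEAP", "YAWEAP"), "seen_enemy_has_factory"),
--     (("GAAIRC",), "seen_enemy_has_airfield"),
--     (("GAYARD", "NAYARD"), "seen_enemy_has_naval_yard"),
--     (("AMRADR", "NARADR"), "seen_enemy_has_radar"),
--     (("GADEPT", "NADEPT"), "seen_enemy_has_service_depot"),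
--     (("GATECH", "NATECH"), "seen_enemy_has_tech_center"),
--     (("GAOREP",), "seen_enemy_has_ore_purifier"),
--     (("GAGAP",), "seen_enemy_has_gap_generator"),
--     (("NACLON",), "seen_enemy_has_cloning_vat"),
--     (("NAPSIS", "YAPSIS"), "seen_enemy_has_psychic_sensor"),
--     (("NAMISL",), "seen_enemy_has_nuclear_silo"),
--     (("NAIRON",), "seen_enemy_has_iron_curtain"),
--     (("GAWEAT",), "seen_enemy_has_weather_control"),
--     (("GACSPH",), "seen_enemy_has_chronosphere"),
-- ]
-- _NAME_TO_FLAG = {name: flag for names, flag in _CATEGORIES for name in names}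
--
--
-- def build_enemy_memory_tech_flags(seen_enemy_building_names):
--     seen_flags = set()
--     for name in seen_enemy_building_names:
--         flag = _NAME_TO_FLAG.get(name)
--         if flag is not None:
--             seen_flags.add(flag)
--
--     def has(flag):
--         return flag in seen_flags
--
--     tier2 = (has("seen_enemy_has_radar") or has("seen_enemy_has_service_depot")
--              or has("seen_enemy_has_tech_center"))
--     derived = [
--         has("seen_enemy_has_barracks"),
--         has("seen_enemy_has_factory"),
--         has("seen_enemy_has_airfield"),
--         has("seen_enemy_has_naval_yard"),
--         tier2,
--         has("seen_enemy_has_tech_center"),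
--     ]
--     return [int(has(flag)) for _, flag in _CATEGORIES] + [int(v) for v in derived]
-- ===== Notes on version B (the rewrite author's own statement) =====
-- stated objective: alternative
-- what changed: Replaces A's 18 per-category set intersections (and the flags dict built from them) by one flat name-to-flag dict and a single pass over the seen set that collects the matched flag names.
import Mathlib
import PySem

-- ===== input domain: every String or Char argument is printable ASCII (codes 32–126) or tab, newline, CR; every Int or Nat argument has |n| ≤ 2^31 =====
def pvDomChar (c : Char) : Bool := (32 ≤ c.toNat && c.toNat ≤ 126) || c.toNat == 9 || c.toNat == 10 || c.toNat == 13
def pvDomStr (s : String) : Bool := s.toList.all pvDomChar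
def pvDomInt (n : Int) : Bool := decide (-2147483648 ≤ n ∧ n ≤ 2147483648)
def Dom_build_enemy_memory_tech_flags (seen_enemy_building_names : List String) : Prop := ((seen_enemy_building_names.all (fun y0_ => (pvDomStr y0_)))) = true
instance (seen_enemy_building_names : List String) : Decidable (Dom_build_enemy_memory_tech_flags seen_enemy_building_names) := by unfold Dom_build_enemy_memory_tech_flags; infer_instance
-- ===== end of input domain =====

-- B replaces A's 18 set intersections by one flat name→flag dict and a single pass over the seen set (alternative decomposition).
-- The 'set[str]' parameter follows the type convention: a List String of the distinct elements.

-- ===== PORT A =====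
-- A's module-level name sets (Python sets → PySem.Set String literals, all elements distinct)
def CONSTRUCTION_YARD_NAMES : PySem.Set String := ["NACNST", "GACNST", "CACNST", "YACNST"]
def POWER_BUILDING_NAMES : PySem.Set String := ["GAPOWR", "NAPOWR", "NANRCT", "YAPOWR"]
def BARRACKS_NAMES : PySem.Set String := ["GAPILE", "NAHAND", "YABRCK"]
def REFINERY_NAMES : PySem.Set String := ["GAREFN", "NAREFN", "YAREFN"]
def FACTORY_NAMES : PySem.Set String := ["GAWEAP", "NAWEAP", "YAWEAP"]
def AIRFIELD_NAMES : PySem.Set String := ["GAAIRC"]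
def NAVAL_YARD_NAMES : PySem.Set String := ["GAYARD", "NAYARD"]
def RADAR_NAMES : PySem.Set String := ["AMRADR", "NARADR"]
def SERVICE_DEPOT_NAMES : PySem.Set String := ["GADEPT", "NADEPT"]
def TECH_CENTER_NAMES : PySem.Set String := ["GATECH", "NATECH"]
def ORE_PURIFIER_NAMES : PySem.Set String := ["GAOREP"]
def GAP_GENERATOR_NAMES : PySem.Set String := ["GAGAP"]
def CLONING_VAT_NAMES : PySem.Set String := ["NACLON"]
def PSYCHIC_SENSOR_NAMES : PySem.Set String := ["NAPSIS", "YAPSIS"]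
def NUCLEAR_SILO_NAMES : PySem.Set String := ["NAMISL"]
def IRON_CURTAIN_NAMES : PySem.Set String := ["NAIRON"]
def WEATHER_CONTROL_NAMES : PySem.Set String := ["GAWEAT"]
def CHRONOSPHERE_NAMES : PySem.Set String := ["GACSPH"]

def ENEMY_MEMORY_TECH_FLAG_NAMES : List String := [
  "seen_enemy_has_construction_yard", "seen_enemy_has_power", "seen_enemy_has_barracks",
  "seen_enemy_has_refinery", "seen_enemy_has_factory", "seen_enemy_has_airfield",
  "seen_enemy_has_naval_yard", "seen_enemy_has_radar", "seen_enemy_has_service_depot",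
  "seen_enemy_has_tech_center", "seen_enemy_has_ore_purifier", "seen_enemy_has_gap_generator",
  "seen_enemy_has_cloning_vat", "seen_enemy_has_psychic_sensor", "seen_enemy_has_nuclear_silo",
  "seen_enemy_has_iron_curtain", "seen_enemy_has_weather_control", "seen_enemy_has_chronosphere",
  "seen_enemy_unlocks_infantry_production", "seen_enemy_unlocks_vehicle_production",
  "seen_enemy_unlocks_air_production", "seen_enemy_unlocks_naval_production",
  "seen_enemy_unlocks_tier2", "seen_enemy_unlocks_tier3"]

-- bool(s & t) = the intersection is non-empty
def build_enemy_memory_tech_flags (seen_enemy_building_names : List String) : List Int :=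
  let flags : PySem.Dict String Bool :=
    ((((((((((((((((((PySem.Dict.empty
      ).insert "seen_enemy_has_construction_yard" (!(PySem.Set.inter seen_enemy_building_names CONSTRUCTION_YARD_NAMES).isEmpty)
      ).insert "seen_enemy_has_power" (!(PySem.Set.inter seen_enemy_building_names POWER_BUILDING_NAMES).isEmpty)
      ).insert "seen_enemy_has_barracks" (!(PySem.Set.inter seen_enemy_building_names BARRACKS_NAMES).isEmpty)
      ).insert "seen_enemy_has_refinery" (!(PySem.Set.inter seen_enemy_building_names REFINERY_NAMES).isEmpty)
      ).insert "seen_enemy_has_factory" (!(PySem.Set.inter seen_enemy_building_names FACTORY_NAMES).isEmpty)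
      ).insert "seen_enemy_has_airfield" (!(PySem.Set.inter seen_enemy_building_names AIRFIELD_NAMES).isEmpty)
      ).insert "seen_enemy_has_naval_yard" (!(PySem.Set.inter seen_enemy_building_names NAVAL_YARD_NAMES).isEmpty)
      ).insert "seen_enemy_has_radar" (!(PySem.Set.inter seen_enemy_building_names RADAR_NAMES).isEmpty)
      ).insert "seen_enemy_has_service_depot" (!(PySem.Set.inter seen_enemy_building_names SERVICE_DEPOT_NAMES).isEmpty)
      ).insert "seen_enemy_has_tech_center" (!(PySem.Set.inter seen_enemy_building_names TECH_CENTER_NAMES).isEmpty)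
      ).insert "seen_enemy_has_ore_purifier" (!(PySem.Set.inter seen_enemy_building_names ORE_PURIFIER_NAMES).isEmpty)
      ).insert "seen_enemy_has_gap_generator" (!(PySem.Set.inter seen_enemy_building_names GAP_GENERATOR_NAMES).isEmpty)
      ).insert "seen_enemy_has_cloning_vat" (!(PySem.Set.inter seen_enemy_building_names CLONING_VAT_NAMES).isEmpty)
      ).insert "seen_enemy_has_psychic_sensor" (!(PySem.Set.inter seen_enemy_building_names PSYCHIC_SENSOR_NAMES).isEmpty)
      ).insert "seen_enemy_has_nuclear_silo" (!(PySem.Set.inter seen_enemy_building_names NUCLEAR_SILO_NAMES).isEmpty)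
      ).insert "seen_enemy_has_iron_curtain" (!(PySem.Set.inter seen_enemy_building_names IRON_CURTAIN_NAMES).isEmpty)
      ).insert "seen_enemy_has_weather_control" (!(PySem.Set.inter seen_enemy_building_names WEATHER_CONTROL_NAMES).isEmpty)
      ).insert "seen_enemy_has_chronosphere" (!(PySem.Set.inter seen_enemy_building_names CHRONOSPHERE_NAMES).isEmpty)
  -- flags.update({...}): six new keys, inserted in the dict-literal's order; flags[...] reads are getD (all keys present)
  let flags := ((((((flags
      ).insert "seen_enemy_unlocks_infantry_production" (flags.getD "seen_enemy_has_barracks" false)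
      ).insert "seen_enemy_unlocks_vehicle_production" (flags.getD "seen_enemy_has_factory" false)
      ).insert "seen_enemy_unlocks_air_production" (flags.getD "seen_enemy_has_airfield" false)
      ).insert "seen_enemy_unlocks_naval_production" (flags.getD "seen_enemy_has_naval_yard" false)
      ).insert "seen_enemy_unlocks_tier2" (flags.getD "seen_enemy_has_radar" false
          || flags.getD "seen_enemy_has_service_depot" false
          || flags.getD "seen_enemy_has_tech_center" false)
      ).insert "seen_enemy_unlocks_tier3" (flags.getD "seen_enemy_has_tech_center" false)
  ENEMY_MEMORY_TECH_FLAG_NAMES.map (fun name => if flags.getD name false then (1 : Int) else 0)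

-- ===== PORT B =====
def pvCategories : List (List String × String) := [
  (["NACNST", "GACNST", "CACNST", "YACNST"], "seen_enemy_has_construction_yard"),
  (["GAPOWR", "NAPOWR", "NANRCT", "YAPOWR"], "seen_enemy_has_power"),
  (["GAPILE", "NAHAND", "YABRCK"], "seen_enemy_has_barracks"),
  (["GAREFN", "NAREFN", "YAREFN"], "seen_enemy_has_refinery"),
  (["GAWEAP", "NAWEAP", "YAWEAP"], "seen_enemy_has_factory"),
  (["GAAIRC"], "seen_enemy_has_airfield"),
  (["GAYARD", "NAYARD"], "seen_enemy_has_naval_yard"),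
  (["AMRADR", "NARADR"], "seen_enemy_has_radar"),
  (["GADEPT", "NADEPT"], "seen_enemy_has_service_depot"),
  (["GATECH", "NATECH"], "seen_enemy_has_tech_center"),
  (["GAOREP"], "seen_enemy_has_ore_purifier"),
  (["GAGAP"], "seen_enemy_has_gap_generator"),
  (["NACLON"], "seen_enemy_has_cloning_vat"),
  (["NAPSIS", "YAPSIS"], "seen_enemy_has_psychic_sensor"),
  (["NAMISL"], "seen_enemy_has_nuclear_silo"),
  (["NAIRON"], "seen_enemy_has_iron_curtain"),
  (["GAWEAT"], "seen_enemy_has_weather_control"),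
  (["GACSPH"], "seen_enemy_has_chronosphere")]

-- {name: flag for names, flag in _CATEGORIES for name in names}
def pvNameToFlag : PySem.Dict String String :=
  (pvCategories.flatMap (fun c => c.1.map (fun n => (n, c.2)))).foldl
    (fun d p => d.insert p.1 p.2) PySem.Dict.empty

def build_enemy_memory_tech_flags_alt (seen_enemy_building_names : List String) : List Int :=
  let seenFlags : PySem.Set String :=
    seen_enemy_building_names.foldl
      (fun s n => match pvNameToFlag.get? n with
        | some f => PySem.Set.add s f
        | none => s)
      PySem.Set.empty
  let has := fun f => PySem.Set.contains seenFlags f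
  let tier2 := has "seen_enemy_has_radar" || has "seen_enemy_has_service_depot" || has "seen_enemy_has_tech_center"
  let derived := [has "seen_enemy_has_barracks", has "seen_enemy_has_factory",
    has "seen_enemy_has_airfield", has "seen_enemy_has_naval_yard", tier2, has "seen_enemy_has_tech_center"]
  pvCategories.map (fun c => if has c.2 then (1 : Int) else 0)
    ++ derived.map (fun v => if v then (1 : Int) else 0)

-- ===== PRECONDITION & SPEC =====
def Spec_build_enemy_memory_tech_flags (seen_enemy_building_names : List String) (out : List Int) : Prop := out = build_enemy_memory_tech_flags_alt seen_enemy_building_names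
instance (seen_enemy_building_names : List String) (out : List Int) : Decidable (Spec_build_enemy_memory_tech_flags seen_enemy_building_names out) := by unfold Spec_build_enemy_memory_tech_flags; infer_instance

-- ===== CLAIM (what is proved, stated in full; the proofs are below) =====
def Claim_equal_build_enemy_memory_tech_flags : Prop := ∀ (seen_enemy_building_names : List String), Dom_build_enemy_memory_tech_flags seen_enemy_building_names → Spec_build_enemy_memory_tech_flags seen_enemy_building_names (build_enemy_memory_tech_flags seen_enemy_building_names)

-- ===== LEMMAS AND PROOFS =====

-- B's single pass: a flag is in the accumulated set iff some seen name maps to it.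
lemma pv_mem_fold (seen : List String) (s0 : PySem.Set String) (f : String) :
    (f ∈ seen.foldl (fun s n => match pvNameToFlag.get? n with
        | some g => PySem.Set.add s g
        | none => s) s0)
    ↔ (f ∈ s0 ∨ ∃ n ∈ seen, pvNameToFlag.get? n = some f) := by
  induction seen generalizing s0 with
  | nil => simp
  | cons n rest ih =>
    cases hget : pvNameToFlag.get? n with
    | none =>
      simp only [List.foldl_cons, hget, ih]
      constructor
      · rintro (h | ⟨m, hm, he⟩)
        · exact Or.inl h
        · exact Or.inr ⟨m, List.mem_cons_of_mem _ hm, he⟩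
      · rintro (h | ⟨m, hm, he⟩)
        · exact Or.inl h
        · rcases List.mem_cons.mp hm with rfl | hm'
          · rw [hget] at he; cases he
          · exact Or.inr ⟨m, hm', he⟩
    | some g =>
      simp only [List.foldl_cons, hget, ih, PySem.Set.mem_add]
      constructor
      · rintro ((h | rfl) | ⟨m, hm, he⟩)
        · exact Or.inl h
        · exact Or.inr ⟨n, List.mem_cons_self, hget⟩
        · exact Or.inr ⟨m, List.mem_cons_of_mem _ hm, he⟩
      · rintro (h | ⟨m, hm, he⟩)
        · exact Or.inl (Or.inl h)
        · rcases List.mem_cons.mp hm with rfl | hm'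
          · rw [hget] at he
            exact Or.inl (Or.inr (Option.some.injEq .. ▸ he).symm)
          · exact Or.inr ⟨m, hm', he⟩

-- A's bool(seen & cat): the intersection is non-empty iff some seen name is in cat.
lemma pv_inter_nonempty (seen cat : List String) :
    (!(PySem.Set.inter seen cat).isEmpty) = true ↔ ∃ n ∈ seen, n ∈ cat := by
  simp [PySem.Set.inter, List.isEmpty_eq_false_iff, List.eq_nil_iff_forall_not_mem]

-- The name→flag dict, characterised as an association list (its 40 keys are distinct).
set_option maxRecDepth 4096 in
lemma pv_nodup : pvNameToFlag.keys.Nodup := by decide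

lemma pv_lookup (n f : String) : pvNameToFlag.get? n = some f ↔
    (n, f) ∈ (pvCategories.flatMap (fun c => c.1.map (fun m => (m, c.2)))) := by
  rw [PySem.Dict.get?_eq_some_iff_mem_items (d := pvNameToFlag) (hnd := pv_nodup)]
  set_option maxRecDepth 4096 in rfl

-- proof-only abbreviation for B's single-pass fold
def pvFoldAbbrev (seen : List String) : PySem.Set String :=
  seen.foldl (fun s n => match pvNameToFlag.get? n with
    | some g => PySem.Set.add s g
    | none => s) PySem.Set.empty

-- the two per-flag booleans agree, given the dict characterisation of the category
lemma pv_flag_eq (seen cat : List String) (f : String)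
    (hcat : ∀ n, pvNameToFlag.get? n = some f ↔ n ∈ cat) :
    (!(PySem.Set.inter seen cat).isEmpty) = PySem.Set.contains (pvFoldAbbrev seen) f := by
  rw [Bool.eq_iff_iff, pv_inter_nonempty, PySem.Set.contains_iff, pvFoldAbbrev, pv_mem_fold]
  simp only [PySem.Set.empty]
  constructor
  · rintro ⟨n, hn, hc⟩; exact Or.inr ⟨n, hn, (hcat n).mpr hc⟩
  · rintro (h | ⟨n, hn, he⟩)
    · cases h
    · exact ⟨n, hn, (hcat n).mp he⟩

theorem build_enemy_memory_tech_flags_spec : Claim_equal_build_enemy_memory_tech_flags := by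
  intro seen _
  unfold Spec_build_enemy_memory_tech_flags
  unfold build_enemy_memory_tech_flags build_enemy_memory_tech_flags_alt
  have h0 : (!(PySem.Set.inter seen CONSTRUCTION_YARD_NAMES).isEmpty) = PySem.Set.contains (pvFoldAbbrev seen) "seen_enemy_has_construction_yard" :=
    pv_flag_eq seen CONSTRUCTION_YARD_NAMES "seen_enemy_has_construction_yard" (fun n => by simp [pv_lookup, pvCategories, CONSTRUCTION_YARD_NAMES])
  have h1 : (!(PySem.Set.inter seen POWER_BUILDING_NAMES).isEmpty) = PySem.Set.contains (pvFoldAbbrev seen) "seen_enemy_has_power" :=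
    pv_flag_eq seen POWER_BUILDING_NAMES "seen_enemy_has_power" (fun n => by simp [pv_lookup, pvCategories, POWER_BUILDING_NAMES])
  have h2 : (!(PySem.Set.inter seen BARRACKS_NAMES).isEmpty) = PySem.Set.contains (pvFoldAbbrev seen) "seen_enemy_has_barracks" :=
    pv_flag_eq seen BARRACKS_NAMES "seen_enemy_has_barracks" (fun n => by simp [pv_lookup, pvCategories, BARRACKS_NAMES])
  have h3 : (!(PySem.Set.inter seen REFINERY_NAMES).isEmpty) = PySem.Set.contains (pvFoldAbbrev seen) "seen_enemy_has_refinery" :=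
    pv_flag_eq seen REFINERY_NAMES "seen_enemy_has_refinery" (fun n => by simp [pv_lookup, pvCategories, REFINERY_NAMES])
  have h4 : (!(PySem.Set.inter seen FACTORY_NAMES).isEmpty) = PySem.Set.contains (pvFoldAbbrev seen) "seen_enemy_has_factory" :=
    pv_flag_eq seen FACTORY_NAMES "seen_enemy_has_factory" (fun n => by simp [pv_lookup, pvCategories, FACTORY_NAMES])
  have h5 : (!(PySem.Set.inter seen AIRFIELD_NAMES).isEmpty) = PySem.Set.contains (pvFoldAbbrev seen) "seen_enemy_has_airfield" :=
    pv_flag_eq seen AIRFIELD_NAMES "seen_enemy_has_airfield" (fun n => by simp [pv_lookup, pvCategories, AIRFIELD_NAMES])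
  have h6 : (!(PySem.Set.inter seen NAVAL_YARD_NAMES).isEmpty) = PySem.Set.contains (pvFoldAbbrev seen) "seen_enemy_has_naval_yard" :=
    pv_flag_eq seen NAVAL_YARD_NAMES "seen_enemy_has_naval_yard" (fun n => by simp [pv_lookup, pvCategories, NAVAL_YARD_NAMES])
  have h7 : (!(PySem.Set.inter seen RADAR_NAMES).isEmpty) = PySem.Set.contains (pvFoldAbbrev seen) "seen_enemy_has_radar" :=
    pv_flag_eq seen RADAR_NAMES "seen_enemy_has_radar" (fun n => by simp [pv_lookup, pvCategories, RADAR_NAMES])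
  have h8 : (!(PySem.Set.inter seen SERVICE_DEPOT_NAMES).isEmpty) = PySem.Set.contains (pvFoldAbbrev seen) "seen_enemy_has_service_depot" :=
    pv_flag_eq seen SERVICE_DEPOT_NAMES "seen_enemy_has_service_depot" (fun n => by simp [pv_lookup, pvCategories, SERVICE_DEPOT_NAMES])
  have h9 : (!(PySem.Set.inter seen TECH_CENTER_NAMES).isEmpty) = PySem.Set.contains (pvFoldAbbrev seen) "seen_enemy_has_tech_center" :=
    pv_flag_eq seen TECH_CENTER_NAMES "seen_enemy_has_tech_center" (fun n => by simp [pv_lookup, pvCategories, TECH_CENTER_NAMES])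
  have h10 : (!(PySem.Set.inter seen ORE_PURIFIER_NAMES).isEmpty) = PySem.Set.contains (pvFoldAbbrev seen) "seen_enemy_has_ore_purifier" :=
    pv_flag_eq seen ORE_PURIFIER_NAMES "seen_enemy_has_ore_purifier" (fun n => by simp [pv_lookup, pvCategories, ORE_PURIFIER_NAMES])
  have h11 : (!(PySem.Set.inter seen GAP_GENERATOR_NAMES).isEmpty) = PySem.Set.contains (pvFoldAbbrev seen) "seen_enemy_has_gap_generator" :=
    pv_flag_eq seen GAP_GENERATOR_NAMES "seen_enemy_has_gap_generator" (fun n => by simp [pv_lookup, pvCategories, GAP_GENERATOR_NAMES])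
  have h12 : (!(PySem.Set.inter seen CLONING_VAT_NAMES).isEmpty) = PySem.Set.contains (pvFoldAbbrev seen) "seen_enemy_has_cloning_vat" :=
    pv_flag_eq seen CLONING_VAT_NAMES "seen_enemy_has_cloning_vat" (fun n => by simp [pv_lookup, pvCategories, CLONING_VAT_NAMES])
  have h13 : (!(PySem.Set.inter seen PSYCHIC_SENSOR_NAMES).isEmpty) = PySem.Set.contains (pvFoldAbbrev seen) "seen_enemy_has_psychic_sensor" :=
    pv_flag_eq seen PSYCHIC_SENSOR_NAMES "seen_enemy_has_psychic_sensor" (fun n => by simp [pv_lookup, pvCategories, PSYCHIC_SENSOR_NAMES])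
  have h14 : (!(PySem.Set.inter seen NUCLEAR_SILO_NAMES).isEmpty) = PySem.Set.contains (pvFoldAbbrev seen) "seen_enemy_has_nuclear_silo" :=
    pv_flag_eq seen NUCLEAR_SILO_NAMES "seen_enemy_has_nuclear_silo" (fun n => by simp [pv_lookup, pvCategories, NUCLEAR_SILO_NAMES])
  have h15 : (!(PySem.Set.inter seen IRON_CURTAIN_NAMES).isEmpty) = PySem.Set.contains (pvFoldAbbrev seen) "seen_enemy_has_iron_curtain" :=
    pv_flag_eq seen IRON_CURTAIN_NAMES "seen_enemy_has_iron_curtain" (fun n => by simp [pv_lookup, pvCategories, IRON_CURTAIN_NAMES])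
  have h16 : (!(PySem.Set.inter seen WEATHER_CONTROL_NAMES).isEmpty) = PySem.Set.contains (pvFoldAbbrev seen) "seen_enemy_has_weather_control" :=
    pv_flag_eq seen WEATHER_CONTROL_NAMES "seen_enemy_has_weather_control" (fun n => by simp [pv_lookup, pvCategories, WEATHER_CONTROL_NAMES])
  have h17 : (!(PySem.Set.inter seen CHRONOSPHERE_NAMES).isEmpty) = PySem.Set.contains (pvFoldAbbrev seen) "seen_enemy_has_chronosphere" :=
    pv_flag_eq seen CHRONOSPHERE_NAMES "seen_enemy_has_chronosphere" (fun n => by simp [pv_lookup, pvCategories, CHRONOSPHERE_NAMES])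
  simp only [ENEMY_MEMORY_TECH_FLAG_NAMES, pvCategories, List.map_cons, List.map_nil,
    List.cons_append, List.nil_append, PySem.Dict.getD_insert, PySem.Dict.getD_empty,
    String.reduceEq, if_true, if_false, pvFoldAbbrev] at *
  rw [h0, h1, h2, h3, h4, h5, h6, h7, h8, h9, h10, h11, h12, h13, h14, h15, h16, h17]
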